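-- pv_equiv track=rewrite | github.com/tz2614/rosalind | overlap_graph.py | overlap_seqs
-- ===== SOURCE A (Python) =====
-- def overlap_seqs(dataset):
-- 	for id1, seq1 in dataset.items():
-- 		suffix = seq1[-3:]
-- 		for id2, seq2 in dataset.items():
-- 			prefix = seq2[:3]
-- 			if seq1 != seq2:
-- 				if suffix == prefix:
-- 					yield(' '.join([id1, id2]))
-- ===== SOURCE B (Python) =====
-- def overlap_seqs(dataset):
--     # Index sequences by their 3-char prefix once; each suffix lookup then
--     # touches only the matching bucket instead of rescanning the whole dict.
--     index = {}
--     for id2, seq2 in dataset.items():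
--         index.setdefault(seq2[:3], []).append((id2, seq2))
--     for id1, seq1 in dataset.items():
--         for id2, seq2 in index.get(seq1[-3:], []):
--             if seq1 != seq2:
--                 yield ' '.join([id1, id2])
-- ===== Notes on version B (the rewrite author's own statement) =====
-- stated objective: faster
-- what changed: Replaces A's nested scan over all pairs with a single pass that buckets sequences by their 3-char prefix in a dict, then looks each sequence's suffix up in that index.
import Mathlib
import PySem

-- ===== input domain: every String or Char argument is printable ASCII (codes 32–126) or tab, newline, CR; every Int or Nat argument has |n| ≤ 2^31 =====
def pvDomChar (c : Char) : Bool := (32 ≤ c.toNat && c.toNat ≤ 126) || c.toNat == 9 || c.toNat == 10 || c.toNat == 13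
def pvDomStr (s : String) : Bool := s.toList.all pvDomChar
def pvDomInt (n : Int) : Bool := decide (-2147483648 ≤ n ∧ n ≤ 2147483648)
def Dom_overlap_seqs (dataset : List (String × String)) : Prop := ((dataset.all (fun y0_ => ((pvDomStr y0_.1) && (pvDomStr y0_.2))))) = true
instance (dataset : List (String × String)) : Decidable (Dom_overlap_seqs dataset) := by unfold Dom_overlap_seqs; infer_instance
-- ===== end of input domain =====

-- B replaces A's quadratic double scan with a dict indexing sequences by 3-char prefix,
-- so each suffix lookup visits only its matching bucket (objective: faster, asymptotic).
-- The Python `dataset` parameter is a dict; both ports receive it as the association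
-- list and apply PySem.Dict.ofList (dict semantics: last value wins, first position kept).

-- ===== PORT A =====
def overlap_seqs (dataset : List (String × String)) : List String :=
  let d := PySem.Dict.ofList dataset
  d.items.foldl (fun out p1 =>
    let suffix := PySem.Str.slice p1.2 (some (-3)) none
    d.items.foldl (fun out p2 =>
      let pre3 := PySem.Str.slice p2.2 none (some 3)
      if p1.2 ≠ p2.2 then
        if suffix = pre3 then out ++ [PySem.Str.join " " [p1.1, p2.1]] else out
      else out) out) []

-- ===== PORT B =====
def overlap_seqs_alt (dataset : List (String × String)) : List String :=
  let d := PySem.Dict.ofList dataset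
  let index := d.items.foldl (fun ix p =>
      ix.modify (PySem.Str.slice p.2 none (some 3)) [] (· ++ [p])) PySem.Dict.empty
  d.items.foldl (fun out p1 =>
    (index.getD (PySem.Str.slice p1.2 (some (-3)) none) []).foldl (fun out p2 =>
      if p1.2 ≠ p2.2 then out ++ [PySem.Str.join " " [p1.1, p2.1]] else out) out) []

-- ===== PRECONDITION & SPEC =====
def Spec_overlap_seqs (dataset : List (String × String)) (out : List String) : Prop := out = overlap_seqs_alt dataset
instance (dataset : List (String × String)) (out : List String) : Decidable (Spec_overlap_seqs dataset out) := by unfold Spec_overlap_seqs; infer_instance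

-- ===== CLAIM (what is proved, stated in full; the proofs are below) =====
def Claim_equal_overlap_seqs : Prop := ∀ (dataset : List (String × String)), Dom_overlap_seqs dataset → Spec_overlap_seqs dataset (overlap_seqs dataset)

-- ===== LEMMAS AND PROOFS =====

-- B's prefix index, read back at key c, is exactly the prefix-filtered item list.
theorem pv_index_getD (l : List (String × String)) (c : String) :
    (l.foldl (fun ix p => ix.modify (PySem.Str.slice p.2 none (some 3)) [] (· ++ [p]))
        PySem.Dict.empty).getD c []
      = l.filter (fun p => PySem.Str.slice p.2 none (some 3) == c) := by
  have h2 : (l.foldl (fun ix p => PySem.Dict.modify ix (PySem.Str.slice p.2 none (some 3)) [] (· ++ [p]))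
        PySem.Dict.empty)
      = ((l.map (fun p : String × String => (PySem.Str.slice p.2 none (some 3), p))).foldl
          (fun ix q => PySem.Dict.modify ix q.1 [] (· ++ [q.2])) PySem.Dict.empty) :=
    (@List.foldl_map _ _ _ (fun p : String × String => (PySem.Str.slice p.2 none (some 3), p))
      (fun ix q => PySem.Dict.modify ix q.1 [] (· ++ [q.2])) l PySem.Dict.empty).symm
  rw [h2]
  rw [PySem.Dict.getD_foldl_modify_append]
  simp [List.filter_map, Function.comp_def]

-- the two inner loops agree once the bucket is the filtered list
theorem pv_inner (l : List (String × String)) (p1 : String × String) (out : List String) :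
    l.foldl (fun out p2 =>
      if p1.2 ≠ p2.2 then
        if PySem.Str.slice p1.2 (some (-3)) none = PySem.Str.slice p2.2 none (some 3)
        then out ++ [PySem.Str.join " " [p1.1, p2.1]] else out
      else out) out
    = (l.filter (fun p => PySem.Str.slice p.2 none (some 3)
          == PySem.Str.slice p1.2 (some (-3)) none)).foldl
        (fun out p2 => if p1.2 ≠ p2.2 then out ++ [PySem.Str.join " " [p1.1, p2.1]] else out)
        out := by
  have hA : l.foldl (fun out p2 =>
      if p1.2 ≠ p2.2 then
        if PySem.Str.slice p1.2 (some (-3)) none = PySem.Str.slice p2.2 none (some 3)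
        then out ++ [PySem.Str.join " " [p1.1, p2.1]] else out
      else out) out
    = l.foldl (fun out p2 =>
      if p1.2 ≠ p2.2 ∧ PySem.Str.slice p1.2 (some (-3)) none = PySem.Str.slice p2.2 none (some 3)
      then out ++ [PySem.Str.join " " [p1.1, p2.1]] else out) out := by
    apply PySem.List.foldl_congr_mem
    intro acc x _
    by_cases h1 : p1.2 ≠ x.2 <;> by_cases h2 :
        PySem.Str.slice p1.2 (some (-3)) none = PySem.Str.slice x.2 none (some 3) <;>
      simp [h1, h2]
  rw [hA, PySem.List.foldl_append_ite, PySem.List.foldl_append_ite]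
  congr 1
  rw [List.filter_filter]
  congr 1
  apply List.filter_congr
  intro p _
  rw [Bool.eq_iff_iff]
  simp only [Bool.and_eq_true, decide_eq_true_iff, beq_iff_eq]
  exact ⟨fun ⟨h1, h2⟩ => ⟨h1, h2.symm⟩, fun ⟨h1, h2⟩ => ⟨h1, h2.symm⟩⟩

-- ===== VERDICT (by name: the statement is the Claim_ definition above) =====
theorem overlap_seqs_spec : Claim_equal_overlap_seqs := by
  intro dataset _
  unfold Spec_overlap_seqs overlap_seqs overlap_seqs_alt
  apply PySem.List.foldl_congr_mem
  intro acc p1 _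
  rw [pv_index_getD, pv_inner]
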